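-- pv_equiv track=rewrite | github.com/lzp14225-ux/cost-accounting-2 | backend/api_gateway/repositories/review_repository.py | _build_nc_failed_items
-- ===== SOURCE A (Python) =====
-- from typing import List, Dict, Any, Optional
--
-- def _build_nc_failed_items(
--
--     nc_failed_itemcodes: List[str],
--     subgraphs: List[Dict[str, Any]]
-- ) -> List[Dict[str, Any]]:
--     if not nc_failed_itemcodes:
--         return []
--
--     subgraph_map = {}
--     for subgraph in subgraphs:
--         part_code = str(subgraph.get("part_code") or "").strip()
--         if part_code and part_code not in subgraph_map:
--             subgraph_map[part_code] = subgraph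
--
--     items = []
--     for code in nc_failed_itemcodes:
--         matched = subgraph_map.get(code, {})
--         items.append({
--             "record_id": matched.get("subgraph_id") or code,
--             "record_name": matched.get("subgraph_id") or code,
--             "subgraph_id": matched.get("subgraph_id"),
--             "part_code": matched.get("part_code") or code,
--             "part_name": matched.get("part_name"),
--             "reason": "NC识别失败",
--         })
--     return items
-- ===== SOURCE B (Python) =====
-- from typing import List, Dict, Any
--
-- def _build_nc_failed_items(
--     nc_failed_itemcodes: List[str],
--     subgraphs: List[Dict[str, Any]]
-- ) -> List[Dict[str, Any]]:
--     if not nc_failed_itemcodes: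
--         return []
--
--     def find_match(code):
--         for subgraph in subgraphs:
--             part_code = str(subgraph.get("part_code") or "").strip()
--             if part_code and part_code == code:
--                 return subgraph
--         return {}
--
--     def make_item(code):
--         matched = find_match(code)
--         return {
--             "record_id": matched.get("subgraph_id") or code,
--             "record_name": matched.get("subgraph_id") or code,
--             "subgraph_id": matched.get("subgraph_id"),
--             "part_code": matched.get("part_code") or code,
--             "part_name": matched.get("part_name"),
--             "reason": "NC识别失败",
--         }
--
--     return [make_item(code) for code in nc_failed_itemcodes]
-- ===== Notes on version B (the rewrite author's own statement) =====
-- stated objective: simpler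
-- what changed: Dropped the precomputed first-occurrence subgraph_map and the accumulator append loop; B finds each code's first matching subgraph by a direct linear scan and builds the result with a list comprehension.
import Mathlib
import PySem

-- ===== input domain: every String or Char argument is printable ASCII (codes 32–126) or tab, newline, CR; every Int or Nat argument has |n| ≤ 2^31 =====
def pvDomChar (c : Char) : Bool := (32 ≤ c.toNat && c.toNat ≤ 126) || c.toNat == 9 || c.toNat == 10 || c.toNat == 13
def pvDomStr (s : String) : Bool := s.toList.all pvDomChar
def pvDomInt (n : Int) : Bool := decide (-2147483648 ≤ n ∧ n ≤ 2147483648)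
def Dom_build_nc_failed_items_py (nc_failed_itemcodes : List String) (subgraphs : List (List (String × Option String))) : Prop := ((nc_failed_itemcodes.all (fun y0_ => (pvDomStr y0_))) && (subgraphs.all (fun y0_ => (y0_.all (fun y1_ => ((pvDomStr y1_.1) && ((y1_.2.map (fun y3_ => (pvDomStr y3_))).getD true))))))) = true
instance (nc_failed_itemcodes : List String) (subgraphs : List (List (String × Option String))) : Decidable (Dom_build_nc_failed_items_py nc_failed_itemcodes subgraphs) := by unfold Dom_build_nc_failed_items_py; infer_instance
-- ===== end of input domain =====

-- B drops A's precomputed first-occurrence subgraph_map and accumulator loop: it scans the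
-- subgraph list directly per code and builds the result by a list comprehension (simpler; not faster).

-- ===== PORT A =====
-- subgraph.get(k) on a dict represented as an association list (first match wins)
def pvGetA (d : List (String × Option String)) (k : String) : Option (Option String) :=
  (d.find? (fun kv => kv.1 == k)).map (fun kv => kv.2)

-- str(subgraph.get("part_code") or "").strip()
def pvPartCodeA (sg : List (String × Option String)) : String :=
  PySem.Str.strip (match pvGetA sg "part_code" with
    | some (some s) => s
    | _ => "")

-- matched.get(k) or code  (Python truthiness: None and "" are falsy)
def pvOrCodeA (v : Option (Option String)) (code : String) : String :=
  match v with
  | some (some s) => if s == "" then code else s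
  | _ => code

def build_nc_failed_items_py (nc_failed_itemcodes : List String) (subgraphs : List (List (String × Option String))) : List (List (String × Option String)) :=
  if nc_failed_itemcodes = [] then []
  else
    let subgraph_map := subgraphs.foldl (fun m sg =>
      let part_code := pvPartCodeA sg
      if part_code != "" && !(m.contains part_code) then m.insert part_code sg else m)
      (PySem.Dict.empty : PySem.Dict String (List (String × Option String)))
    nc_failed_itemcodes.foldl (fun items code =>
      let matched := (subgraph_map.get? code).getD []
      items ++ [[("record_id", some (pvOrCodeA (pvGetA matched "subgraph_id") code)),
                 ("record_name", some (pvOrCodeA (pvGetA matched "subgraph_id") code)),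
                 ("subgraph_id", (pvGetA matched "subgraph_id").bind id),
                 ("part_code", some (pvOrCodeA (pvGetA matched "part_code") code)),
                 ("part_name", (pvGetA matched "part_name").bind id),
                 ("reason", some "NC识别失败")]]) []

-- ===== PORT B =====
def pvGetB (d : List (String × Option String)) (k : String) : Option (Option String) :=
  (d.find? (fun kv => kv.1 == k)).map (fun kv => kv.2)

def pvPartCodeB (sg : List (String × Option String)) : String :=
  PySem.Str.strip (match pvGetB sg "part_code" with
    | some (some s) => s
    | _ => "")

def pvOrCodeB (v : Option (Option String)) (code : String) : String :=
  match v with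
  | some (some s) => if s == "" then code else s
  | _ => code

-- find_match: first subgraph whose stripped part_code is non-empty and equals code, else {}
def pvFindMatchB (subgraphs : List (List (String × Option String))) (code : String) : List (String × Option String) :=
  (subgraphs.find? (fun sg =>
    let part_code := pvPartCodeB sg
    part_code != "" && part_code == code)).getD []

def pvMakeItemB (subgraphs : List (List (String × Option String))) (code : String) : List (String × Option String) :=
  let matched := pvFindMatchB subgraphs code
  [("record_id", some (pvOrCodeB (pvGetB matched "subgraph_id") code)),
   ("record_name", some (pvOrCodeB (pvGetB matched "subgraph_id") code)),
   ("subgraph_id", (pvGetB matched "subgraph_id").bind id),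
   ("part_code", some (pvOrCodeB (pvGetB matched "part_code") code)),
   ("part_name", (pvGetB matched "part_name").bind id),
   ("reason", some "NC识别失败")]

def build_nc_failed_items_py_alt (nc_failed_itemcodes : List String) (subgraphs : List (List (String × Option String))) : List (List (String × Option String)) :=
  if nc_failed_itemcodes = [] then []
  else nc_failed_itemcodes.map (pvMakeItemB subgraphs)

-- ===== PRECONDITION & SPEC =====
def Spec_build_nc_failed_items_py (nc_failed_itemcodes : List String) (subgraphs : List (List (String × Option String))) (out : List (List (String × Option String))) : Prop := out = build_nc_failed_items_py_alt nc_failed_itemcodes subgraphs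
instance (nc_failed_itemcodes : List String) (subgraphs : List (List (String × Option String))) (out : List (List (String × Option String))) : Decidable (Spec_build_nc_failed_items_py nc_failed_itemcodes subgraphs out) := by unfold Spec_build_nc_failed_items_py; infer_instance

-- ===== CLAIM (what is proved, stated in full; the proofs are below) =====
def Claim_equal_build_nc_failed_items_py : Prop := ∀ (nc_failed_itemcodes : List String) (subgraphs : List (List (String × Option String))), Dom_build_nc_failed_items_py nc_failed_itemcodes subgraphs → Spec_build_nc_failed_items_py nc_failed_itemcodes subgraphs (build_nc_failed_items_py nc_failed_itemcodes subgraphs)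

-- ===== LEMMAS AND PROOFS =====

theorem pvPartCode_eq : pvPartCodeB = pvPartCodeA := rfl

-- the first-occurrence map lookup equals a direct first-match scan
theorem pvMap_get (subgraphs : List (List (String × Option String)))
    (m : PySem.Dict String (List (String × Option String))) (code : String) :
    (subgraphs.foldl (fun m sg =>
      let part_code := pvPartCodeA sg
      if part_code != "" && !(m.contains part_code) then m.insert part_code sg else m) m).get? code
    = (m.get? code).or (subgraphs.find? (fun sg =>
        let part_code := pvPartCodeA sg
        part_code != "" && part_code == code)) := by
  induction subgraphs generalizing m with
  | nil => simp
  | cons sg rest ih =>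
    simp only [List.foldl_cons]
    rw [ih, List.find?_cons]
    by_cases hne : pvPartCodeA sg = ""
    · simp [hne]
    · by_cases hcode : pvPartCodeA sg = code
      · subst hcode
        by_cases hc : m.contains (pvPartCodeA sg) = true
        · have hsome : (m.get? (pvPartCodeA sg)).isSome := by
            rwa [PySem.Dict.contains_eq_isSome_get?] at hc
          obtain ⟨v, hv⟩ := Option.isSome_iff_exists.mp hsome
          simp [hc, hv]
        · have hnone : m.get? (pvPartCodeA sg) = none := by
            rwa [PySem.Dict.contains_eq_isSome_get?, Bool.not_eq_true,
              Option.isSome_eq_false_iff, Option.isNone_iff_eq_none] at hc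
          have hb : (pvPartCodeA sg != "") = true := by simpa using hne
          simp [hb, hc, hnone, PySem.Dict.get?_insert_self]
      · have hpred : (pvPartCodeA sg != "" && pvPartCodeA sg == code) = false := by
          simp [hcode]
        rw [hpred]
        by_cases hc : m.contains (pvPartCodeA sg) = true
        · simp [hc]
        · rw [if_pos (by simp [hne, hc])]
          rw [PySem.Dict.get?_insert_of_ne _ _ (fun h => hcode h.symm)]

theorem pvItem_eq (subgraphs : List (List (String × Option String))) (code : String)
    (m : PySem.Dict String (List (String × Option String)))
    (hm : m = subgraphs.foldl (fun m sg =>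
      let part_code := pvPartCodeA sg
      if part_code != "" && !(m.contains part_code) then m.insert part_code sg else m)
      PySem.Dict.empty) :
    (m.get? code).getD [] = pvFindMatchB subgraphs code := by
  subst hm
  rw [pvMap_get]
  simp [pvFindMatchB, pvPartCode_eq, PySem.Dict.get?_empty]

-- ===== VERDICT (by name: the statement is the Claim_ definition above) =====
theorem build_nc_failed_items_py_spec : Claim_equal_build_nc_failed_items_py := by
  intro nc subgraphs _
  show build_nc_failed_items_py nc subgraphs = build_nc_failed_items_py_alt nc subgraphs
  unfold build_nc_failed_items_py build_nc_failed_items_py_alt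
  by_cases h : nc = []
  · simp [h]
  · simp only [h]
    rw [PySem.List.foldl_append_singleton_eq_map]
    apply List.map_congr_left
    intro code _
    rw [pvItem_eq subgraphs code _ rfl]
    rfl
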